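-- pv_equiv track=rewrite | github.com/Barbod1380/KedroPipeline-Jules | src/data_pipeline/pipelines/utils/detect_region_by_words_base.py | predict_by_rule
-- ===== SOURCE A (Python) =====
-- from typing import List, Tuple, Any
--
-- def predict_by_rule(input_string: str, rules: List[Tuple]) -> int:
--     matched_outputs = set()
--     for conditions, number in rules:
--         match = True
--         for operator, phrase in conditions:
--             if operator == " + ":
--                 if phrase not in input_string:
--                     match = False
--                     break
--             elif operator == " - ":
--                 if phrase in input_string:
--                     match = False
--                     break
--         if match:
--             matched_outputs.add(number)
--             # Early exit if we already have multiple distinct outputs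
--             if len(matched_outputs) >= 2:
--                 return -1
--
--     return matched_outputs.pop() if len(matched_outputs) == 1 else -1
-- ===== SOURCE B (Python) =====
-- def predict_by_rule(input_string, rules):
--     # Group the condition lists by their output number first, then test each
--     # distinct number once: a number is matched iff any of its condition lists
--     # has no failing condition.
--     by_number = {}
--     for conditions, number in rules:
--         by_number.setdefault(number, []).append(conditions)
--
--     matched = [number for number, cond_lists in by_number.items()
--                if any(not any((op == " + " and ph not in input_string) or
--                               (op == " - " and ph in input_string)
--                               for op, ph in conds)
--                       for conds in cond_lists)]
--     return matched[0] if len(matched) == 1 else -1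
-- ===== Notes on version B (the rewrite author's own statement) =====
-- stated objective: alternative
-- what changed: B first groups the condition lists into a dict keyed by output number, then tests each distinct number once (any of its condition lists failure-free), replacing A's per-rule scan that accumulates a growing set of matched outputs with an early exit.
import Mathlib
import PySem

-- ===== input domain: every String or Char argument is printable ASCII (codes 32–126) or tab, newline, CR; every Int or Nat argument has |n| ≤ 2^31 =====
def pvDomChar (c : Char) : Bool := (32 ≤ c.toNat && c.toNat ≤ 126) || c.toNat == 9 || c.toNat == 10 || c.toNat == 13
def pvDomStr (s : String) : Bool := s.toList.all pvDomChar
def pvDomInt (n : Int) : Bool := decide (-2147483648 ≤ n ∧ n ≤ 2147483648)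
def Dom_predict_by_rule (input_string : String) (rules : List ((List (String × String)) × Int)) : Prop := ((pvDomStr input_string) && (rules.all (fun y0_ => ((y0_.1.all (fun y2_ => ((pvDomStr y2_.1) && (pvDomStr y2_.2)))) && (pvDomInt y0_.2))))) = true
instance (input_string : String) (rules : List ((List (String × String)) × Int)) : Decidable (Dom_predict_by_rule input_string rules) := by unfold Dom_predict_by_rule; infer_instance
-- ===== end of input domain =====

-- B groups the condition lists by output number into a dict and then tests each
-- distinct number once, instead of A's per-rule scan accumulating a set of matched
-- outputs with an early exit; same results by a different decomposition.

-- ===== PORT A =====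
-- inner 'for operator, phrase in conditions' loop with break
def pvCondsMatchA (input_string : String) : List (String × String) → Bool
  | [] => true
  | (operator, phrase) :: rest =>
    if operator = " + " then
      if PySem.Str.isIn phrase input_string then pvCondsMatchA input_string rest else false
    else if operator = " - " then
      if PySem.Str.isIn phrase input_string then false else pvCondsMatchA input_string rest
    else pvCondsMatchA input_string rest

-- outer loop over rules, carrying matched_outputs (a Python set), with the >=2 early exit;
-- on a singleton set, .pop() is its unique element (head!)
def pvLoopA (input_string : String) (acc : PySem.Set Int) :
    List ((List (String × String)) × Int) → Int
  | [] => if acc.length = 1 then acc.head! else -1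
  | (conditions, number) :: rest =>
    if pvCondsMatchA input_string conditions then
      let acc' := PySem.Set.add acc number
      if 2 ≤ acc'.length then -1 else pvLoopA input_string acc' rest
    else pvLoopA input_string acc rest

def predict_by_rule (input_string : String) (rules : List ((List (String × String)) × Int)) : Int :=
  pvLoopA input_string PySem.Set.empty rules

-- ===== PORT B =====
-- the per-condition failure test of Source B's inner 'any(...)'
def pvFails (input_string : String) (c : String × String) : Bool :=
  (c.1 = " + " && !(PySem.Str.isIn c.2 input_string)) ||
  (c.1 = " - " && PySem.Str.isIn c.2 input_string)

-- 'any(not any(fails ...) for conds in cond_lists)'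
def pvAnyOK (input_string : String) (cond_lists : List (List (String × String))) : Bool :=
  cond_lists.any (fun conds => !(conds.any (pvFails input_string)))

-- the grouping loop 'by_number.setdefault(number, []).append(conditions)'
def pvByNumber (rules : List ((List (String × String)) × Int)) :
    PySem.Dict Int (List (List (String × String))) :=
  rules.foldl (fun d r => d.modify r.2 [] (· ++ [r.1])) PySem.Dict.empty

def predict_by_rule_alt (input_string : String) (rules : List ((List (String × String)) × Int)) : Int :=
  let matched : List Int :=
    ((pvByNumber rules).items.filter (fun p => pvAnyOK input_string p.2)).map (·.1)
  if matched.length = 1 then matched.head! else -1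

-- ===== PRECONDITION & SPEC =====
def Spec_predict_by_rule (input_string : String) (rules : List ((List (String × String)) × Int)) (out : Int) : Prop := out = predict_by_rule_alt input_string rules
instance (input_string : String) (rules : List ((List (String × String)) × Int)) (out : Int) : Decidable (Spec_predict_by_rule input_string rules out) := by unfold Spec_predict_by_rule; infer_instance

-- ===== CLAIM (what is proved, stated in full; the proofs are below) =====
def Claim_equal_predict_by_rule : Prop := ∀ (input_string : String) (rules : List ((List (String × String)) × Int)), Dom_predict_by_rule input_string rules → Spec_predict_by_rule input_string rules (predict_by_rule input_string rules)

-- ===== LEMMAS AND PROOFS =====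

-- A's inner loop is 'no condition fails'
theorem condsMatch_eq_not_fails (s : String) (conds : List (String × String)) :
    pvCondsMatchA s conds = !(conds.any (pvFails s)) := by
  induction conds with
  | nil => rfl
  | cons c rest ih =>
    obtain ⟨op, ph⟩ := c
    simp only [pvCondsMatchA, List.any_cons, pvFails]
    by_cases h1 : op = " + " <;> by_cases h2 : op = " - " <;>
      simp [h1, h2, ih]

theorem length_le_add (acc : PySem.Set Int) (n : Int) :
    acc.length ≤ (PySem.Set.add acc n).length := by
  unfold PySem.Set.add
  split <;> simp

theorem length_le_foldl_add (l : List Int) (acc : PySem.Set Int) :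
    acc.length ≤ (l.foldl PySem.Set.add acc).length := by
  induction l generalizing acc with
  | nil => simp
  | cons x t ih => exact le_trans (length_le_add acc x) (ih _)

-- loop invariant: for any accumulator of size ≤ 1, A's loop computes the
-- size-1 test on the set of matched numbers
theorem loopA_eq (s : String) (rules : List ((List (String × String)) × Int))
    (acc : PySem.Set Int) (h : acc.length ≤ 1) :
    pvLoopA s acc rules =
      (let m := ((rules.filter (fun r => pvCondsMatchA s r.1)).map (·.2)).foldl PySem.Set.add acc
       if m.length = 1 then m.head! else -1) := by
  induction rules generalizing acc with
  | nil => simp [pvLoopA]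
  | cons r rest ih =>
    obtain ⟨conds, n⟩ := r
    simp only [pvLoopA]
    by_cases hm : pvCondsMatchA s conds = true
    · simp only [hm, if_pos, List.filter_cons_of_pos, List.map_cons, List.foldl_cons]
      by_cases h2 : 2 ≤ (PySem.Set.add acc n).length
      · have hge := length_le_foldl_add ((rest.filter (fun r => pvCondsMatchA s r.1)).map (·.2)) (PySem.Set.add acc n)
        simp only [h2, if_pos]
        have hne : (((rest.filter (fun r => pvCondsMatchA s r.1)).map (·.2)).foldl PySem.Set.add (PySem.Set.add acc n)).length ≠ 1 := by omega
        simp [hne]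
      · simp only [h2, if_neg, not_false_iff]
        exact ih (PySem.Set.add acc n) (by omega)
    · rw [if_neg hm, List.filter_cons_of_neg (by simp [hm])]
      simpa using ih acc h

-- the grouping fold, seen as a fold over (key, value) pairs
theorem byNumber_eq_swap (rules : List ((List (String × String)) × Int)) :
    pvByNumber rules =
      (rules.map (fun r => (r.2, r.1))).foldl
        (fun d p => d.modify p.1 [] (· ++ [p.2])) PySem.Dict.empty := by
  rw [List.foldl_map]; rfl

theorem keys_byNumber (rules : List ((List (String × String)) × Int)) :
    (pvByNumber rules).keys = PySem.Set.ofList (rules.map (·.2)) := by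
  unfold pvByNumber
  rw [PySem.Dict.keys_foldl_modify_key rules (·.2)]
  simp [PySem.Dict.keys_empty, PySem.Set.update_nil_left]

theorem nodup_keys_byNumber (rules : List ((List (String × String)) × Int)) :
    (pvByNumber rules).keys.Nodup := by
  rw [keys_byNumber]; exact PySem.Set.nodup_ofList _

theorem getD_byNumber (rules : List ((List (String × String)) × Int)) (n : Int) :
    (pvByNumber rules).getD n [] =
      ((rules.map (fun r => (r.2, r.1))).filter (fun p => p.1 == n)).map (·.2) := by
  rw [byNumber_eq_swap, PySem.Dict.getD_foldl_modify_append]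
  simp

-- B's candidate test at a number: some rule with this number matches
theorem anyOK_getD (s : String) (rules : List ((List (String × String)) × Int)) (n : Int) :
    pvAnyOK s ((pvByNumber rules).getD n []) = true ↔
      ∃ r ∈ rules, r.2 = n ∧ pvCondsMatchA s r.1 = true := by
  rw [getD_byNumber]
  unfold pvAnyOK
  simp only [List.any_map, List.any_filter, List.any_eq_true, Function.comp,
    Bool.and_eq_true, beq_iff_eq, condsMatch_eq_not_fails]

-- membership in B's matched list
theorem mem_matchedB (s : String) (rules : List ((List (String × String)) × Int)) (n : Int) :
    n ∈ (((pvByNumber rules).items.filter (fun p => pvAnyOK s p.2)).map (·.1)) ↔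
      ∃ r ∈ rules, r.2 = n ∧ pvCondsMatchA s r.1 = true := by
  have hnd := nodup_keys_byNumber rules
  rw [PySem.Dict.items_eq_map_keys (pvByNumber rules) hnd []]
  simp only [List.filter_map, List.map_map, List.mem_map, List.mem_filter]
  constructor
  · rintro ⟨k, ⟨hk, hok⟩, rfl⟩
    exact (anyOK_getD s rules k).mp hok
  · rintro ⟨r, hr, hn, hm⟩
    refine ⟨n, ⟨?_, (anyOK_getD s rules n).mpr ⟨r, hr, hn, hm⟩⟩, rfl⟩
    rw [keys_byNumber]
    exact (PySem.Set.mem_ofList _ _).mpr (List.mem_map.mpr ⟨r, hr, hn⟩)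

-- B's matched list has no duplicates (keys of a dict)
theorem nodup_matchedB (s : String) (rules : List ((List (String × String)) × Int)) :
    (((pvByNumber rules).items.filter (fun p => pvAnyOK s p.2)).map (·.1)).Nodup := by
  have hnd := nodup_keys_byNumber rules
  rw [PySem.Dict.items_eq_map_keys (pvByNumber rules) hnd []]
  simp only [List.filter_map, List.map_map]
  have : ((·.1) ∘ fun k => (k, (pvByNumber rules).getD k [])) = (id : Int → Int) := rfl
  rw [this, List.map_id]
  exact hnd.filter _

-- matched numbers computed by A's fold, as a deduped list
theorem matchedA_eq_ofList (s : String) (rules : List ((List (String × String)) × Int)) :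
    (((rules.filter (fun r => pvCondsMatchA s r.1)).map (·.2)).foldl PySem.Set.add
        PySem.Set.empty)
      = PySem.Set.ofList ((rules.filter (fun r => pvCondsMatchA s r.1)).map (·.2)) :=
  (PySem.Set.ofList_eq_foldl _).symm

-- membership in A's matched set
theorem mem_matchedA (s : String) (rules : List ((List (String × String)) × Int)) (n : Int) :
    n ∈ (((rules.filter (fun r => pvCondsMatchA s r.1)).map (·.2)).foldl PySem.Set.add
          PySem.Set.empty) ↔
      ∃ r ∈ rules, r.2 = n ∧ pvCondsMatchA s r.1 = true := by
  rw [matchedA_eq_ofList]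
  simp only [PySem.Set.mem_ofList, List.mem_map, List.mem_filter]
  constructor
  · rintro ⟨r, ⟨hr, hm⟩, rfl⟩; exact ⟨r, hr, rfl, hm⟩
  · rintro ⟨r, hr, hn, hm⟩; exact ⟨r, ⟨hr, hm⟩, hn⟩

-- the unique-or-(-1) decision agrees on any two permuted candidate lists
theorem perm_pick (SA MB : List Int) (h : SA.Perm MB) :
    (if SA.length = 1 then SA.head! else -1) = (if MB.length = 1 then MB.head! else -1) := by
  have hlen := h.length_eq
  by_cases h1 : MB.length = 1
  · rw [if_pos (hlen.trans h1), if_pos h1]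
    obtain ⟨b, hb⟩ := List.length_eq_one_iff.mp h1
    obtain ⟨a, ha⟩ := List.length_eq_one_iff.mp (hlen.trans h1)
    have hab : a ∈ MB := h.subset (by simp [ha])
    rw [hb, List.mem_singleton] at hab
    rw [ha, hb, hab]
  · rw [if_neg (fun hc => h1 (hlen ▸ hc)), if_neg h1]

-- ===== VERDICT (by name: the statement is the Claim_ definition above) =====
theorem predict_by_rule_spec : Claim_equal_predict_by_rule := by
  intro s rules _
  unfold Spec_predict_by_rule predict_by_rule predict_by_rule_alt
  rw [loopA_eq s rules PySem.Set.empty (by simp [PySem.Set.empty])]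
  refine perm_pick _ _ ?_
  rw [List.perm_ext_iff_of_nodup ?_ (nodup_matchedB s rules)]
  · intro n
    rw [mem_matchedA, mem_matchedB]
  · rw [matchedA_eq_ofList]
    exact PySem.Set.nodup_ofList _
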